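-- pv_equiv track=rewrite | github.com/Shubh26/A-B-group-splitter | control_test_splitter.py | get_test_control_zips
-- ===== SOURCE A (Python) =====
-- def get_test_control_zips(original_data, subsets, control_key='control'):
--     """
--     Will return 2 groups - test zips, control zips
--
--     Arguments:
--     original_data:dict
--         original input dictionary with store_id as key & value as another dictionary with keys 'control_influence', 'test_influence'
--     subsets:dict
--         a dict with key as name of the group & value as the store list for that group.
--     control_key:string
--         specify which key in the subsets dict is control.
--     """
--     control_zips, test_zips = set(), set()
--     for subset_name, assigned_elements in subsets.items():
--         temp_zips = []
--         for elem in assigned_elements: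
--             temp_zips = original_data[elem]['control_influence' if subset_name == control_key else 'test_influence']
--             if subset_name == control_key:
--                 control_zips.update(temp_zips)
--             else:
--                 test_zips.update(temp_zips)
--     return test_zips, control_zips
-- ===== SOURCE B (Python) =====
-- def get_test_control_zips(original_data, subsets, control_key='control'):
--     """
--     Will return 2 groups - test zips, control zips
--
--     Divide-and-conquer: split the list of subset items in half, solve each half
--     into a (test, control) pair of sets, and merge the halves with set union.
--     A single-subset leaf is summarised by one set comprehension.
--     """
--     items = list(subsets.items())
--
--     def solve(part):
--         if not part:
--             return set(), set()
--         if len(part) == 1: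
--             name, elems = part[0]
--             zips = {z for e in elems
--                       for z in original_data[e]['control_influence' if name == control_key
--                                                 else 'test_influence']}
--             return (set(), zips) if name == control_key else (zips, set())
--         mid = len(part) // 2
--         t1, c1 = solve(part[:mid])
--         t2, c2 = solve(part[mid:])
--         return t1 | t2, c1 | c2
--
--     return solve(items)
-- ===== Notes on version B (the rewrite author's own statement) =====
-- stated objective: alternative
-- what changed: Replaces A's single interleaved accumulator loop (which dispatches every element into one of two growing sets) with a divide-and-conquer recursion: the subsets list is split in half, each half is solved into a (test, control) pair of sets, halves are merged by set union, and a one-subset leaf is summarised by a single set comprehension.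
import Mathlib
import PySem

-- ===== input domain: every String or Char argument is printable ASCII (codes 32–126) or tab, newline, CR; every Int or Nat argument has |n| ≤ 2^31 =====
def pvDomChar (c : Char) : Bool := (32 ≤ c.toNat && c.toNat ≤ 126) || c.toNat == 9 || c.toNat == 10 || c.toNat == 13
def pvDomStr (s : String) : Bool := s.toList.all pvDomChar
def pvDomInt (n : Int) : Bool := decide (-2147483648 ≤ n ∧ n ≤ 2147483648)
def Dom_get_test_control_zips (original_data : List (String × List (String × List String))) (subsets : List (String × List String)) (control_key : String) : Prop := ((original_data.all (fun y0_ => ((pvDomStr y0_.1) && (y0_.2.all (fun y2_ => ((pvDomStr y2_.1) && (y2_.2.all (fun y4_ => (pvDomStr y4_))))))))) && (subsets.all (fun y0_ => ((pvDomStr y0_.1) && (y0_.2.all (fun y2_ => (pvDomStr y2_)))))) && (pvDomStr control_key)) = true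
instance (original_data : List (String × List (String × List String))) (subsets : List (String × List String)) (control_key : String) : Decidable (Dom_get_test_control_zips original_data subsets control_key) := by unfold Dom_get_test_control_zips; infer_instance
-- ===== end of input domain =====

-- B replaces A's single interleaved accumulator loop by a divide-and-conquer recursion over the
-- subset items (halves solved into (test, control) set pairs and merged by set union); objective:
-- an alternative structure of similar cost.

-- ===== PORT A =====
-- original_data[elem][key] (both Python dict lookups; total via getD, Pre_ guarantees both keys exist)
def pvInfl (original_data : List (String × List (String × List String))) (elem key : String) : List String :=
  PySem.Dict.getD (PySem.Dict.mk (PySem.Dict.getD (PySem.Dict.mk original_data) elem [])) key []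

def get_test_control_zips (original_data : List (String × List (String × List String))) (subsets : List (String × List String)) (control_key : String) : List String × List String :=
  -- control_zips, test_zips = set(), set(); interleaved loop over subsets.items()
  let r : List String × List String :=
    subsets.foldl (fun acc p =>
      p.2.foldl (fun acc elem =>
        let temp_zips := pvInfl original_data elem (if p.1 == control_key then "control_influence" else "test_influence")
        if p.1 == control_key then (PySem.Set.update acc.1 temp_zips, acc.2)
        else (acc.1, PySem.Set.update acc.2 temp_zips)) acc)
      (([] : List String), ([] : List String))
  (r.2, r.1)

-- ===== PORT B =====
-- the recursive solve(part) of Source B: [] and singleton leaves, otherwise split at len//2 and union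
def pvSolve (original_data : List (String × List (String × List String))) (control_key : String) : List (String × List String) → List String × List String
  | [] => (([] : List String), ([] : List String))
  | [p] =>
      -- zips = {z for e in elems for z in original_data[e][...]}
      let zips : List String :=
        PySem.Set.ofList (p.2.flatMap (fun e =>
          pvInfl original_data e (if p.1 == control_key then "control_influence" else "test_influence")))
      if p.1 == control_key then (([] : List String), zips) else (zips, ([] : List String))
  | a :: b :: rest =>
      let part := a :: b :: rest
      let mid := part.length / 2
      let r1 := pvSolve original_data control_key (part.take mid)
      let r2 := pvSolve original_data control_key (part.drop mid)
      (PySem.Set.union r1.1 r2.1, PySem.Set.union r1.2 r2.2)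
  termination_by part => part.length
  decreasing_by
  · simp [List.length_take]; omega
  · simp; omega

def get_test_control_zips_alt (original_data : List (String × List (String × List String))) (subsets : List (String × List String)) (control_key : String) : List String × List String :=
  pvSolve original_data control_key subsets

-- ===== PRECONDITION & SPEC =====
-- Pre_ excludes (a) inputs on which A raises KeyError (an element missing from original_data, or its
-- record missing the needed influence key) and (b) subsets given as an association list with duplicate
-- group names, which no Python dict can denote.
def Pre_get_test_control_zips (original_data : List (String × List (String × List String))) (subsets : List (String × List String)) (control_key : String) : Prop :=
  (subsets.map Prod.fst).Nodup ∧
  ∀ p ∈ subsets, ∀ e ∈ p.2,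
    ((PySem.Dict.get? (PySem.Dict.mk original_data) e).elim false
      (fun d => PySem.Dict.contains (PySem.Dict.mk d)
        (if p.1 == control_key then "control_influence" else "test_influence"))) = true
instance (original_data : List (String × List (String × List String))) (subsets : List (String × List String)) (control_key : String) : Decidable (Pre_get_test_control_zips original_data subsets control_key) := by unfold Pre_get_test_control_zips; infer_instance

def pvWitness_get_test_control_zips : (List (String × List (String × List String))) × (List (String × List String)) × String :=
  ([("s1", [("control_influence", ["c1", "c2"]), ("test_influence", ["t1"])]),
    ("s2", [("control_influence", ["c2"]), ("test_influence", ["t2", "t1"])])],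
   [("control", ["s1"]), ("g1", ["s2", "s1"]), ("g2", [])],
   "control")

def Spec_get_test_control_zips (original_data : List (String × List (String × List String))) (subsets : List (String × List String)) (control_key : String) (out : List String × List String) : Prop := out = get_test_control_zips_alt original_data subsets control_key
instance (original_data : List (String × List (String × List String))) (subsets : List (String × List String)) (control_key : String) (out : List String × List String) : Decidable (Spec_get_test_control_zips original_data subsets control_key out) := by unfold Spec_get_test_control_zips; infer_instance

-- ===== CLAIM (what is proved, stated in full; the proofs are below) =====
def Claim_equal_get_test_control_zips : Prop := ∀ (original_data : List (String × List (String × List String))) (subsets : List (String × List String)) (control_key : String), Dom_get_test_control_zips original_data subsets control_key → Pre_get_test_control_zips original_data subsets control_key → Spec_get_test_control_zips original_data subsets control_key (get_test_control_zips original_data subsets control_key)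

-- ===== LEMMAS AND PROOFS =====

-- the flat stream of control (resp. test) zips, in A's traversal order
def pvStreamC (od : List (String × List (String × List String))) (ck : String) (ss : List (String × List String)) : List String :=
  ss.flatMap (fun p => if p.1 == ck then p.2.flatMap (fun e => pvInfl od e "control_influence") else [])

def pvStreamT (od : List (String × List (String × List String))) (ck : String) (ss : List (String × List String)) : List String :=
  ss.flatMap (fun p => if p.1 == ck then [] else p.2.flatMap (fun e => pvInfl od e "test_influence"))

-- updating by a deduplicated stream is updating by the stream itself
theorem pvUpdate_ofList {α : Type} [BEq α] [LawfulBEq α] (s : PySem.Set α) (l : List α) :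
    PySem.Set.update s (PySem.Set.ofList l) = PySem.Set.update s l := by
  rw [PySem.Set.update_eq_append_filter, PySem.Set.update_eq_append_filter, PySem.Set.ofList_ofList]

-- A's inner element loop over one subset is one Set.update by the flattened stream
theorem pvInnerUpdate (od : List (String × List (String × List String))) (k : String)
    (elems : List String) (s : List String) :
    elems.foldl (fun s e => PySem.Set.update s (pvInfl od e k)) s
      = PySem.Set.update s (elems.flatMap (fun e => pvInfl od e k)) := by
  induction elems generalizing s with
  | nil => rfl
  | cons x xs ih => simp only [List.foldl_cons, List.flatMap_cons, PySem.Set.update_append, ih]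

theorem pvFoldl_pair_fst {α β γ : Type} (f : α → γ → α) (l : List γ) (c : α) (t : β) :
    l.foldl (fun acc e => (f acc.1 e, acc.2)) (c, t) = (l.foldl f c, t) := by
  induction l generalizing c with
  | nil => rfl
  | cons x xs ih => simp [List.foldl_cons, ih]

theorem pvFoldl_pair_snd {α β γ : Type} (f : β → γ → β) (l : List γ) (c : α) (t : β) :
    l.foldl (fun acc e => (acc.1, f acc.2 e)) (c, t) = (c, l.foldl f t) := by
  induction l generalizing t with
  | nil => rfl
  | cons x xs ih => simp [List.foldl_cons, ih]

-- A's inner loop over one subset entry, as an update of one of the two components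
theorem pvInner (od : List (String × List (String × List String))) (ck name : String)
    (elems : List String) (c t : List String) :
    elems.foldl (fun acc elem =>
        let temp_zips := pvInfl od elem (if name == ck then "control_influence" else "test_influence")
        if name == ck then (PySem.Set.update acc.1 temp_zips, acc.2)
        else (acc.1, PySem.Set.update acc.2 temp_zips)) (c, t)
      = if name == ck
        then (PySem.Set.update c (elems.flatMap (fun e => pvInfl od e "control_influence")), t)
        else (c, PySem.Set.update t (elems.flatMap (fun e => pvInfl od e "test_influence"))) := by
  by_cases hb : (name == ck) = true
  · simp only [hb, if_true]
    rw [pvFoldl_pair_fst (fun s e => PySem.Set.update s (pvInfl od e "control_influence")) elems c t,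
        pvInnerUpdate]
  · simp only [hb, Bool.false_eq_true, if_false]
    rw [pvFoldl_pair_snd (fun s e => PySem.Set.update s (pvInfl od e "test_influence")) elems c t,
        pvInnerUpdate]

-- A's outer fold from (c, t): one update per component by the two flat streams
theorem pvAChar (od : List (String × List (String × List String))) (ck : String)
    (ss : List (String × List String)) (c t : List String) :
    ss.foldl (fun acc p =>
      p.2.foldl (fun acc elem =>
        let temp_zips := pvInfl od elem (if p.1 == ck then "control_influence" else "test_influence")
        if p.1 == ck then (PySem.Set.update acc.1 temp_zips, acc.2)
        else (acc.1, PySem.Set.update acc.2 temp_zips)) acc) (c, t)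
    = (PySem.Set.update c (pvStreamC od ck ss), PySem.Set.update t (pvStreamT od ck ss)) := by
  induction ss generalizing c t with
  | nil => rfl
  | cons p rest ih =>
      simp only [List.foldl_cons]
      rw [pvInner od ck p.1 p.2 c t]
      by_cases hb : (p.1 == ck) = true
      · simp only [hb, if_true]
        rw [ih]
        simp only [pvStreamC, pvStreamT, List.flatMap_cons, hb, if_true,
          PySem.Set.update_append, List.nil_append]
      · have hb' : (p.1 == ck) = false := by simpa using hb
        simp only [hb', Bool.false_eq_true, if_false]
        rw [ih]
        simp only [pvStreamC, pvStreamT, List.flatMap_cons, hb', Bool.false_eq_true, if_false,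
          PySem.Set.update_append, List.nil_append]

-- the streams split over a concatenation of subset lists
theorem pvStreamC_append (od : List (String × List (String × List String))) (ck : String)
    (l1 l2 : List (String × List String)) :
    pvStreamC od ck (l1 ++ l2) = pvStreamC od ck l1 ++ pvStreamC od ck l2 := by
  simp [pvStreamC]

theorem pvStreamT_append (od : List (String × List (String × List String))) (ck : String)
    (l1 l2 : List (String × List String)) :
    pvStreamT od ck (l1 ++ l2) = pvStreamT od ck l1 ++ pvStreamT od ck l2 := by
  simp [pvStreamT]

-- B's divide-and-conquer recursion computes the deduplicated streams
theorem pvBChar (od : List (String × List (String × List String))) (ck : String) :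
    ∀ (n : Nat) (ss : List (String × List String)), ss.length ≤ n →
    pvSolve od ck ss = (PySem.Set.ofList (pvStreamT od ck ss), PySem.Set.ofList (pvStreamC od ck ss)) := by
  intro n
  induction n with
  | zero =>
      intro ss h
      have : ss = [] := List.eq_nil_of_length_eq_zero (Nat.le_zero.mp h)
      subst this; simp [pvSolve, pvStreamC, pvStreamT]
  | succ n ih =>
      intro ss h
      match ss with
      | [] => simp [pvSolve, pvStreamC, pvStreamT]
      | [p] =>
          by_cases hb : (p.1 == ck) = true
          · simp only [pvSolve, pvStreamC, pvStreamT, List.flatMap_cons, List.flatMap_nil,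
              List.append_nil, hb, if_true, PySem.Set.ofList_nil]
          · have hb' : (p.1 == ck) = false := by simpa using hb
            simp only [pvSolve, pvStreamC, pvStreamT, List.flatMap_cons, List.flatMap_nil,
              List.append_nil, hb', Bool.false_eq_true, if_false, PySem.Set.ofList_nil]
      | a :: b :: rest =>
          rw [pvSolve]
          have hlen : (a :: b :: rest).length = rest.length + 2 := by simp
          have hmidlen : (List.take ((a :: b :: rest).length / 2) (a :: b :: rest)).length
              ≤ n := by
            simp only [List.length_take]
            have := h; simp at this ⊢; omega
          have hdroplen : (List.drop ((a :: b :: rest).length / 2) (a :: b :: rest)).length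
              ≤ n := by
            simp only [List.length_drop]
            have := h; simp at this ⊢; omega
          rw [ih _ hmidlen, ih _ hdroplen]
          have hsplit : (a :: b :: rest) =
              List.take ((a :: b :: rest).length / 2) (a :: b :: rest)
              ++ List.drop ((a :: b :: rest).length / 2) (a :: b :: rest) :=
            (List.take_append_drop _ _).symm
          conv_rhs => rw [hsplit]
          rw [pvStreamC_append, pvStreamT_append]
          simp only [PySem.Set.union, PySem.Set.ofList_append, pvUpdate_ofList]

-- ===== VERDICT (by name: the statement is the Claim_ definition above) =====
theorem get_test_control_zips_spec : Claim_equal_get_test_control_zips := by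
  intro od subsets ck _ _
  unfold Spec_get_test_control_zips get_test_control_zips get_test_control_zips_alt
  rw [pvAChar od ck subsets [] []]
  rw [pvBChar od ck subsets.length subsets (le_refl _)]
  rfl
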